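-- pv_equiv track=rewrite | github.com/Kxrbx/Clawlet | clawlet/agent/identity.py | _prune_empty_sections
-- ===== SOURCE A (Python) =====
-- def _prune_empty_sections(content: str) -> str:
--     """Remove headings that ended up with no real content after placeholder filtering."""
--     lines = content.splitlines()
--     result: list[str] = []
--     i = 0
--     while i < len(lines):
--         line = lines[i]
--         if line.strip().startswith("## "):
--             section = [line]
--             i += 1
--             while i < len(lines) and not lines[i].strip().startswith("## "):
--                 section.append(lines[i])
--                 i += 1
--             body = [entry.strip() for entry in section[1:] if entry.strip()]
--             if body:
--                 if result and result[-1] != "":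
--                     result.append("")
--                 result.extend(section)
--             continue
--         result.append(line)
--         i += 1
--     return "\n".join(result)
-- ===== SOURCE B (Python) =====
-- def _prune_empty_sections(content: str) -> str:
--     """Remove headings that ended up with no real content after placeholder filtering."""
--     lines = content.splitlines()
--     preamble: list[str] = []
--     segments: list[list[str]] = []
--     current = None
--     for line in lines:
--         if line.strip().startswith("## "):
--             current = [line]
--             segments.append(current)
--         elif current is None:
--             preamble.append(line)
--         else:
--             current.append(line)
--     result = list(preamble)
--     for seg in segments:
--         if any(entry.strip() for entry in seg[1:]):
--             if result and result[-1] != "":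
--                 result.append("")
--             result.extend(seg)
--     return "\n".join(result)
-- ===== Notes on version B (the rewrite author's own statement) =====
-- stated objective: alternative
-- what changed: Replaced A's single index-driven while loop with a nested inner scan by a two-phase decomposition: one linear pass splits the lines into a preamble plus a list of heading segments, and a second pass emits the preamble and each segment whose body has non-empty content.
import Mathlib
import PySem

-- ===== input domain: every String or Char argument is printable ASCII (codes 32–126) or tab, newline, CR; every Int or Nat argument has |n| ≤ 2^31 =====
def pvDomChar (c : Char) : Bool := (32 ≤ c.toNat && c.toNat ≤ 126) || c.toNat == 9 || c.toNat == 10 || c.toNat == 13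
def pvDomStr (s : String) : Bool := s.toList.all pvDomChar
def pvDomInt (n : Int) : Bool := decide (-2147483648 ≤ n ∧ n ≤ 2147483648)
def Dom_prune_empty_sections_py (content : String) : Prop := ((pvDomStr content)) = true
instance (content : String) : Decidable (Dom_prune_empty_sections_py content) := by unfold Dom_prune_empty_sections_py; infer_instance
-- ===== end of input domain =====

-- B restructures A's single while-loop (with nested section scan) into a two-phase
-- segmentation pass + emission pass; same cost, no behaviour change.

-- ===== PORT A =====
-- line.strip().startswith("## ")
def pvIsHead (line : String) : Bool := PySem.Str.startswith (PySem.Str.strip line) "## "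

-- A's inner while loop: collect lines until the next heading
def pvTakeSec : List String → List String × List String
  | [] => ([], [])
  | l :: ls =>
    if pvIsHead l then ([], l :: ls)
    else
      let p := pvTakeSec ls
      (l :: p.1, p.2)

theorem pvTakeSec_len (ls : List String) : (pvTakeSec ls).2.length ≤ ls.length := by
  induction ls with
  | nil => simp [pvTakeSec]
  | cons l ls ih =>
    simp only [pvTakeSec]
    split
    · simp
    · simpa using Nat.le_succ_of_le ih

-- A's outer while loop, with the accumulated `result`
def pvLoopA (result : List String) : List String → List String
  | [] => result
  | line :: rest =>
    if pvIsHead line then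
      let p := pvTakeSec rest
      let body := (p.1.map PySem.Str.strip).filter (fun e => e != "")
      if body ≠ [] then
        let result' := if result ≠ [] ∧ result.getLast? ≠ some "" then result ++ [""] else result
        pvLoopA (result' ++ (line :: p.1)) p.2
      else pvLoopA result p.2
    else pvLoopA (result ++ [line]) rest
termination_by ls => ls.length
decreasing_by
  · exact Nat.lt_succ_of_le (pvTakeSec_len rest)
  · exact Nat.lt_succ_of_le (pvTakeSec_len rest)
  · simp

def prune_empty_sections_py (content : String) : String :=
  PySem.Str.join "\n" (pvLoopA [] (PySem.Str.splitlines content))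

-- ===== PORT B =====
-- B's first pass: fold building (preamble, finished segments, current segment)
def pvStepB (st : List String × List (List String) × Option (List String)) (line : String) :
    List String × List (List String) × Option (List String) :=
  if pvIsHead line then
    (st.1, (match st.2.2 with | none => st.2.1 | some c => st.2.1 ++ [c]), some [line])
  else
    match st.2.2 with
    | none => (st.1 ++ [line], st.2.1, none)
    | some c => (st.1, st.2.1, some (c ++ [line]))

-- end of the first pass: flush the current segment (Python mutates `current` in place;
-- the functional port flushes it once at the end)
def pvFlushB (st : List String × List (List String) × Option (List String)) :
    List String × List (List String) :=
  (st.1, match st.2.2 with | none => st.2.1 | some c => st.2.1 ++ [c])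

-- B's second pass over the segments
def pvEmitB (result : List String) : List (List String) → List String
  | [] => result
  | seg :: rest =>
    if (seg.drop 1).any (fun e => PySem.Str.strip e != "") then
      let result' := if result ≠ [] ∧ result.getLast? ≠ some "" then result ++ [""] else result
      pvEmitB (result' ++ seg) rest
    else pvEmitB result rest

def prune_empty_sections_py_alt (content : String) : String :=
  let st := pvFlushB ((PySem.Str.splitlines content).foldl pvStepB ([], [], none))
  PySem.Str.join "\n" (pvEmitB st.1 st.2)

-- ===== PRECONDITION & SPEC =====
def Spec_prune_empty_sections_py (content : String) (out : String) : Prop := out = prune_empty_sections_py_alt content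
instance (content : String) (out : String) : Decidable (Spec_prune_empty_sections_py content out) := by unfold Spec_prune_empty_sections_py; infer_instance

-- ===== CLAIM (what is proved, stated in full; the proofs are below) =====
def Claim_equal_prune_empty_sections_py : Prop := ∀ (content : String), Dom_prune_empty_sections_py content → Spec_prune_empty_sections_py content (prune_empty_sections_py content)

-- ===== LEMMAS AND PROOFS =====

-- proof-side characterisation of the segmentation: preamble and chopped segments
def pvPreOf : List String → List String
  | [] => []
  | l :: ls => if pvIsHead l then [] else l :: pvPreOf ls

def pvChop : List String → List (List String)
  | [] => []
  | l :: ls =>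
    if pvIsHead l then (l :: (pvTakeSec ls).1) :: pvChop (pvTakeSec ls).2
    else pvChop ls
termination_by ls => ls.length
decreasing_by
  · exact Nat.lt_succ_of_le (pvTakeSec_len ls)
  · simp

theorem pvPreOf_takeSec (ls : List String) : pvPreOf (pvTakeSec ls).2 = [] := by
  induction ls with
  | nil => simp [pvTakeSec, pvPreOf]
  | cons l ls ih =>
    simp only [pvTakeSec]
    split
    · next h => simp [pvPreOf, h]
    · simpa using ih

theorem pvBody_iff (xs : List String) :
    ((xs.map PySem.Str.strip).filter (fun e => e != "") ≠ []) ↔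
    (xs.any (fun e => PySem.Str.strip e != "") = true) := by
  rw [Ne, List.filter_eq_nil_iff, List.any_eq_true]
  push Not
  constructor
  · rintro ⟨a, ha, hb⟩
    rcases List.mem_map.1 ha with ⟨x, hx, rfl⟩
    exact ⟨x, hx, hb⟩
  · rintro ⟨x, hx, hb⟩
    exact ⟨PySem.Str.strip x, List.mem_map_of_mem hx, hb⟩

theorem pvLoopA_eq_aux : ∀ (n : Nat) (ls : List String), ls.length ≤ n →
    ∀ res, pvLoopA res ls = pvEmitB (res ++ pvPreOf ls) (pvChop ls) := by
  intro n
  induction n with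
  | zero =>
    intro ls h res
    have hls : ls = [] := List.eq_nil_of_length_eq_zero (Nat.le_zero.1 h)
    subst hls
    simp [pvLoopA, pvPreOf, pvChop, pvEmitB]
  | succ n ih =>
    intro ls h res
    match ls with
    | [] => simp [pvLoopA, pvPreOf, pvChop, pvEmitB]
    | line :: rest =>
      have hr : rest.length ≤ n := Nat.le_of_succ_le_succ h
      have hp2 : (pvTakeSec rest).2.length ≤ n := le_trans (pvTakeSec_len rest) hr
      have hpre : pvPreOf (pvTakeSec rest).2 = [] := pvPreOf_takeSec rest
      rw [pvLoopA]
      by_cases hh : pvIsHead line = true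
      · simp only [hh, if_true, pvPreOf, pvChop, List.append_nil]
        rw [pvEmitB]
        by_cases hb : ((pvTakeSec rest).1.map PySem.Str.strip).filter (fun e => e != "") ≠ []
        · have hany : (((line :: (pvTakeSec rest).1).drop 1).any fun e => PySem.Str.strip e != "") = true := by
            simpa using (pvBody_iff _).1 hb
          rw [if_pos hb, if_pos hany, ih _ hp2, hpre, List.append_nil]
        · have hany : ¬ ((((line :: (pvTakeSec rest).1).drop 1).any fun e => PySem.Str.strip e != "") = true) := by
            intro hc
            exact hb ((pvBody_iff _).2 (by simpa using hc))
          rw [if_neg hb, if_neg hany, ih _ hp2, hpre, List.append_nil]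
      · simp only [hh, Bool.false_eq_true, if_false, pvPreOf, pvChop]
        rw [ih _ hr]
        simp

theorem pvLoopA_eq (res ls : List String) :
    pvLoopA res ls = pvEmitB (res ++ pvPreOf ls) (pvChop ls) :=
  pvLoopA_eq_aux ls.length ls le_rfl res

theorem pvFoldB_some (ls : List String) (pre : List String) (segs : List (List String)) (c : List String) :
    pvFlushB (ls.foldl pvStepB (pre, segs, some c)) =
      (pre, segs ++ (c ++ (pvTakeSec ls).1) :: pvChop (pvTakeSec ls).2) := by
  induction ls generalizing segs c with
  | nil => simp [pvFlushB, pvTakeSec, pvChop]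
  | cons l ls ih =>
    by_cases h : pvIsHead l = true
    · simp only [List.foldl_cons, pvStepB, h, if_true]
      rw [ih]
      simp only [pvTakeSec, h, if_true, pvChop]
      simp
    · simp only [List.foldl_cons, pvStepB, h, Bool.false_eq_true, if_false]
      rw [ih]
      simp only [pvTakeSec, h, Bool.false_eq_true, if_false]
      simp

theorem pvFoldB_none (ls : List String) (pre : List String) (segs : List (List String)) :
    pvFlushB (ls.foldl pvStepB (pre, segs, none)) = (pre ++ pvPreOf ls, segs ++ pvChop ls) := by
  induction ls generalizing pre with
  | nil => simp [pvFlushB, pvPreOf, pvChop]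
  | cons l ls ih =>
    by_cases h : pvIsHead l = true
    · simp only [List.foldl_cons, pvStepB, h, if_true]
      rw [pvFoldB_some]
      simp [pvPreOf, pvChop, h]
    · simp only [List.foldl_cons, pvStepB, h, Bool.false_eq_true, if_false]
      rw [ih]
      simp [pvPreOf, pvChop, h]

-- ===== VERDICT (by name: the statement is the Claim_ definition above) =====
theorem prune_empty_sections_py_spec : Claim_equal_prune_empty_sections_py := by
  intro content _
  unfold Spec_prune_empty_sections_py prune_empty_sections_py prune_empty_sections_py_alt
  rw [pvFoldB_none, pvLoopA_eq]
  simp
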